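-- pv_equiv track=rewrite | github.com/Hedy-dev/DataCompression | capitalization.py | recapitalize
-- ===== SOURCE A (Python) =====
-- def capitalization(index, text_list, special_cases_list):
--     if index < 0 or index >= len(text_list):
--         return False
--
--     ch = text_list[index]
--     if not ch.isalpha():
--         return False
--
--     # П1: Первая буква в тексте
--     if index == 0:
--         return True
--
--     if index >= 2 and text_list[index - 1].isupper() and text_list[index - 2].isupper():
--         return False
--
--     # П* правило для специальных слов
--     for special_phrase in special_cases_list:
--         if len(special_phrase) > index + 1: continue
--         for phrase_char_idx in range(len(special_phrase)):
--             text_start_idx_for_match = index - phrase_char_idx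
--             if text_start_idx_for_match >= 0 and \
--                text_start_idx_for_match + len(special_phrase) <= len(text_list):
--                 segment_in_text = "".join(text_list[text_start_idx_for_match : text_start_idx_for_match + len(special_phrase)])
--                 if segment_in_text.lower() == special_phrase.lower():
--                     return special_phrase[phrase_char_idx].isupper()
--
--     # П2: После .!?
--     if index > 0:
--         j = index - 1
--         saw_space_or_newline = False
--         while j >= 0 and text_list[j].isspace():
--             saw_space_or_newline = True
--             j -= 1
--         if saw_space_or_newline and j >= 0 and text_list[j] in '.!?':
--             return True
--
--     # П4: Изолированное 'I'
--     if ch.lower() == 'i':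
--         prev = text_list[index - 1] if index > 0 else ' '
--         next_ch = text_list[index + 1] if index + 1 < len(text_list) else ' '
--
--         if not prev.isalpha() and not next_ch.isalpha():
--             if next_ch == '.':
--                 next_next_ch = text_list[index + 2] if index + 2 < len(text_list) else ' '
--                 if next_next_ch.isalpha():
--                     return False
--             return True
--
--     return False
--
-- def recapitalize(distance_list, decapitalized_text, special_cases_list):
--     # восстановить  индексы искл
--     exception_indices = set()
--     current_index = 0
--     if distance_list:
--         current_index = distance_list[0]
--         exception_indices.add(current_index)
--         for i in range(1, len(distance_list)):
--             current_index += distance_list[i]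
--             exception_indices.add(current_index)
--
--
--     result_chars = list(decapitalized_text)
--
--
--     for i, char in enumerate(result_chars):
--         if not char.isalpha():
--             continue
--
--         rule_says_upper = capitalization(i, result_chars, special_cases_list)
--
--         is_an_exception = i in exception_indices
--
--         # XOR
--         if rule_says_upper ^ is_an_exception:
--             result_chars[i] = char.upper()
--         else:
--
--             result_chars[i] = char.lower()
--
--     return "".join(result_chars)
-- ===== SOURCE B (Python) =====
-- def recapitalize(distance_list, decapitalized_text, special_cases_list):
--     # exception indices = prefix sums of the distances
--     exception_indices = set()
--     acc = 0
--     for d in distance_list: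
--         acc += d
--         exception_indices.add(acc)
--
--     text = decapitalized_text
--     n = len(text)
--     low = text.lower()
--
--     # precomputed occurrence start positions of every special phrase (case-insensitive)
--     phrase_info = []
--     for p in special_cases_list:
--         pl = p.lower()
--         L = len(p)
--         occ = {s for s in range(n - L + 1) if low[s:s + L] == pl}
--         phrase_info.append((p, L, occ))
--
--     # pns[j] = last index <= j holding a non-space character, else -1
--     pns = []
--     last = -1
--     for j, c in enumerate(text):
--         if not c.isspace():
--             last = j
--         pns.append(last)
--
--     def rule(i, out):
--         if i == 0:
--             return True
--         if i >= 2 and out[i - 1].isupper() and out[i - 2].isupper():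
--             return False
--         for p, L, occ in phrase_info:
--             if L > i + 1:
--                 continue
--             for k in range(L):
--                 if (i - k) in occ:
--                     return p[k].isupper()
--         if text[i - 1].isspace():
--             j = pns[i - 1]
--             if j >= 0 and text[j] in '.!?':
--                 return True
--         if low[i] == 'i':
--             prev_alpha = i > 0 and text[i - 1].isalpha()
--             next_alpha = i + 1 < n and text[i + 1].isalpha()
--             if not prev_alpha and not next_alpha:
--                 if i + 1 < n and text[i + 1] == '.' and i + 2 < n and text[i + 2].isalpha():
--                     return False
--                 return True
--         return False
--
--     out = []
--     for i, c in enumerate(text):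
--         if not c.isalpha():
--             out.append(c)
--             continue
--         if rule(i, out) != (i in exception_indices):
--             out.append(c.upper())
--         else:
--             out.append(c.lower())
--     return ''.join(out)
-- ===== Notes on version B (the rewrite author's own statement) =====
-- stated objective: faster
-- what changed: B precomputes once per call: the prefix-sum exception set, the lowercased text, each special phrase's set of case-insensitive occurrence start positions (so the per-character phrase check is set lookups instead of building and lowering a fresh segment per offset), and a last-non-space-index array replacing A's backward while-scan; the result is built by a single append-only pass instead of in-place mutation with a per-index re-check.
import Mathlib
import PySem

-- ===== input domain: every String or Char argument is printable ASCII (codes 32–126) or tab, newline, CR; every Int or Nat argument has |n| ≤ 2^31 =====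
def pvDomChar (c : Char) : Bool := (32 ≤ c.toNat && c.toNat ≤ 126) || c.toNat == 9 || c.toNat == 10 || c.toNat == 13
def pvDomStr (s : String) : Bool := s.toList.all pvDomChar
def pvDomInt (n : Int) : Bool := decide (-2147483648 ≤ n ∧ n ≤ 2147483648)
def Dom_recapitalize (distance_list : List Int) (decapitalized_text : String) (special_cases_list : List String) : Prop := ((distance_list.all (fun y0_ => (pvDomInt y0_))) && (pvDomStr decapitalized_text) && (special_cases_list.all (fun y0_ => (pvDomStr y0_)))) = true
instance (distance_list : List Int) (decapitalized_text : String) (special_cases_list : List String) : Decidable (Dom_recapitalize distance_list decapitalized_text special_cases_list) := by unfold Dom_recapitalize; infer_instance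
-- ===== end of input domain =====

-- B replaces A's per-index work (fresh join+lower of a segment per phrase offset, backward
-- space scan) by precomputed phrase-occurrence positions, a lowercased copy of the text and a
-- last-non-space array, building the result in one append-only pass; objective: faster.

-- ===== PORT A =====
-- inner 'for phrase_char_idx in range(len(special_phrase))' loop of capitalization
def capPhraseInner (textList : List Char) (index : Int) (p : List Char) : List Nat → Option Bool
  | [] => none
  | k :: ks =>
    let start := index - (k : Int)
    if 0 ≤ start ∧ start + (p.length : Int) ≤ (textList.length : Int) then
      let segment := PySem.List.slice textList (some start) (some (start + (p.length : Int)))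
      if PySem.Chars.lower segment = PySem.Chars.lower p then
        some (PySem.Chars.isupper (p.getD k ' '))
      else capPhraseInner textList index p ks
    else capPhraseInner textList index p ks

-- outer 'for special_phrase in special_cases_list' loop
def capPhraseOuter (textList : List Char) (index : Int) : List String → Option Bool
  | [] => none
  | p :: ps =>
    let pc := p.toList
    if (pc.length : Int) > index + 1 then capPhraseOuter textList index ps
    else
      match capPhraseInner textList index pc (List.range pc.length) with
      | some b => some b
      | none => capPhraseOuter textList index ps

-- the 'while j >= 0 and text_list[j].isspace()' loop; returns (saw_space_or_newline, j)
def capSkipSpaces (textList : List Char) (j : Int) (saw : Bool) : Bool × Int :=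
  if h : 0 ≤ j ∧ PySem.Chars.isspace (PySem.List.pyGetD textList j ' ') = true then
    capSkipSpaces textList (j - 1) true
  else (saw, j)
termination_by (j + 1).toNat
decreasing_by omega

def capitalization (index : Int) (textList : List Char) (specialCasesList : List String) : Bool :=
  if index < 0 ∨ (textList.length : Int) ≤ index then false
  else
    let ch := PySem.List.pyGetD textList index ' '
    if PySem.Chars.isalpha ch = false then false
    else if index = 0 then true
    else if 2 ≤ index ∧ PySem.Chars.isupper (PySem.List.pyGetD textList (index - 1) ' ') = true
           ∧ PySem.Chars.isupper (PySem.List.pyGetD textList (index - 2) ' ') = true then false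
    else
      match capPhraseOuter textList index specialCasesList with
      | some b => b
      | none =>
        -- П2
        if 0 < index ∧
            (let sj := capSkipSpaces textList (index - 1) false
             sj.1 = true ∧ 0 ≤ sj.2 ∧
               (PySem.List.pyGetD textList sj.2 ' ' = '.' ∨ PySem.List.pyGetD textList sj.2 ' ' = '!'
                 ∨ PySem.List.pyGetD textList sj.2 ' ' = '?')) then true
        else
          -- П4
          if PySem.Chars.lowerChar ch = 'i' then
            let prev := if 0 < index then PySem.List.pyGetD textList (index - 1) ' ' else ' '
            let nextCh := if index + 1 < (textList.length : Int) then PySem.List.pyGetD textList (index + 1) ' ' else ' '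
            if PySem.Chars.isalpha prev = false ∧ PySem.Chars.isalpha nextCh = false then
              if nextCh = '.' then
                let nextNext := if index + 2 < (textList.length : Int) then PySem.List.pyGetD textList (index + 2) ' ' else ' '
                if PySem.Chars.isalpha nextNext = true then false else true
              else true
            else false
          else false

-- 'exception_indices' reconstruction of recapitalize
def recapExceptions (distance_list : List Int) : List Int :=
  match distance_list with
  | [] => []
  | d0 :: _ =>
    ((PySem.List.pyRange 1 (distance_list.length : Int) 1).foldl
      (fun (st : List Int × Int) i =>
        let cur := st.2 + PySem.List.pyGetD distance_list i 0
        (PySem.Set.add st.1 cur, cur))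
      (PySem.Set.add ([] : List Int) d0, d0)).1

-- one iteration of the 'for i, char in enumerate(result_chars)' loop (mutation rendered as set)
def recapStepA (specialCasesList : List String) (exceptions : List Int) (cs : List Char) (i : Nat) : List Char :=
  let c := cs.getD i ' '
  if PySem.Chars.isalpha c = false then cs
  else
    let ruleSaysUpper := capitalization (i : Int) cs specialCasesList
    let isAnException := decide ((i : Int) ∈ exceptions)
    if (ruleSaysUpper ^^ isAnException) = true then cs.set i (PySem.Chars.upperChar c)
    else cs.set i (PySem.Chars.lowerChar c)

def recapitalize (distance_list : List Int) (decapitalized_text : String) (special_cases_list : List String) : String :=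
  let exceptions := recapExceptions distance_list
  let cs0 := decapitalized_text.toList
  String.ofList ((List.range cs0.length).foldl (recapStepA special_cases_list exceptions) cs0)

-- ===== PORT B =====
-- exception indices as running prefix sums
def altExceptions (distance_list : List Int) : List Int :=
  (distance_list.foldl
    (fun (st : List Int × Int) d =>
      let acc := st.2 + d
      (PySem.Set.add st.1 acc, acc))
    (([] : List Int), (0 : Int))).1

-- (phrase chars, len, occurrence start positions of the lowercased phrase in the lowercased text)
def altPhraseInfo (low : List Char) (n : Nat) (specialCasesList : List String) : List (List Char × Nat × List Int) :=
  specialCasesList.map (fun p =>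
    let pc := p.toList
    let pl := PySem.Chars.lower pc
    let L := pc.length
    (pc, L, (PySem.List.pyRange 0 ((n : Int) - (L : Int) + 1) 1).filter
      (fun s => PySem.List.slice low (some s) (some (s + (L : Int))) = pl)))

-- pns[j] = last index ≤ j holding a non-space character, else -1
def altPns (text : List Char) : List Int :=
  ((PySem.List.enumerate text 0).foldl
    (fun (st : List Int × Int) jc =>
      let last := if PySem.Chars.isspace jc.2 = false then jc.1 else st.2
      (st.1 ++ [last], last))
    (([] : List Int), (-1 : Int))).1

-- 'for k in range(L): if (i - k) in occ: …'
def altPhraseScan (i : Nat) (pc : List Char) (occ : List Int) : List Nat → Option Bool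
  | [] => none
  | k :: ks =>
    if ((i : Int) - (k : Int)) ∈ occ then some (PySem.Chars.isupper (pc.getD k ' '))
    else altPhraseScan i pc occ ks

-- 'for p, L, occ in phrase_info: …'
def altPhraseLoop (i : Nat) : List (List Char × Nat × List Int) → Option Bool
  | [] => none
  | info :: rest =>
    if (info.2.1 : Int) > (i : Int) + 1 then altPhraseLoop i rest
    else
      match altPhraseScan i info.1 info.2.2 (List.range info.2.1) with
      | some b => some b
      | none => altPhraseLoop i rest

def altRule (text low : List Char) (n : Nat) (pinfo : List (List Char × Nat × List Int))
    (pns : List Int) (i : Nat) (out : List Char) : Bool :=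
  if i = 0 then true
  else if 2 ≤ i ∧ PySem.Chars.isupper (out.getD (i - 1) ' ') = true
         ∧ PySem.Chars.isupper (out.getD (i - 2) ' ') = true then false
  else
    match altPhraseLoop i pinfo with
    | some b => b
    | none =>
      if PySem.Chars.isspace (text.getD (i - 1) ' ') = true ∧
          (0 ≤ pns.getD (i - 1) (-1) ∧
            (PySem.List.pyGetD text (pns.getD (i - 1) (-1)) ' ' = '.'
              ∨ PySem.List.pyGetD text (pns.getD (i - 1) (-1)) ' ' = '!'
              ∨ PySem.List.pyGetD text (pns.getD (i - 1) (-1)) ' ' = '?')) then true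
      else if low.getD i ' ' = 'i' then
        let prevAlpha := decide (0 < i) && PySem.Chars.isalpha (text.getD (i - 1) ' ')
        let nextAlpha := decide (i + 1 < n) && PySem.Chars.isalpha (text.getD (i + 1) ' ')
        if prevAlpha = false ∧ nextAlpha = false then
          if (i + 1 < n ∧ text.getD (i + 1) ' ' = '.') ∧ (i + 2 < n ∧ PySem.Chars.isalpha (text.getD (i + 2) ' ') = true) then false
          else true
        else false
      else false

-- one iteration of B's append-only output loop
def altStep (text low : List Char) (n : Nat) (pinfo : List (List Char × Nat × List Int))
    (pns : List Int) (exceptions : List Int) (out : List Char) (jc : Int × Char) : List Char :=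
  let c := jc.2
  if PySem.Chars.isalpha c = false then out ++ [c]
  else if (altRule text low n pinfo pns jc.1.toNat out ^^ decide (jc.1 ∈ exceptions)) = true then
    out ++ [PySem.Chars.upperChar c]
  else out ++ [PySem.Chars.lowerChar c]

def recapitalize_alt (distance_list : List Int) (decapitalized_text : String) (special_cases_list : List String) : String :=
  let exceptions := altExceptions distance_list
  let text := decapitalized_text.toList
  let n := text.length
  let low := PySem.Chars.lower text
  let pinfo := altPhraseInfo low n special_cases_list
  let pns := altPns text
  String.ofList ((PySem.List.enumerate text 0).foldl (altStep text low n pinfo pns exceptions) [])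

-- ===== PRECONDITION & SPEC =====
def Spec_recapitalize (distance_list : List Int) (decapitalized_text : String) (special_cases_list : List String) (out : String) : Prop := out = recapitalize_alt distance_list decapitalized_text special_cases_list
instance (distance_list : List Int) (decapitalized_text : String) (special_cases_list : List String) (out : String) : Decidable (Spec_recapitalize distance_list decapitalized_text special_cases_list out) := by unfold Spec_recapitalize; infer_instance

-- ===== CLAIM (what is proved, stated in full; the proofs are below) =====
def Claim_equal_recapitalize : Prop := ∀ (distance_list : List Int) (decapitalized_text : String) (special_cases_list : List String), Dom_recapitalize distance_list decapitalized_text special_cases_list → Spec_recapitalize distance_list decapitalized_text special_cases_list (recapitalize distance_list decapitalized_text special_cases_list)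


-- ===== LEMMAS AND PROOFS =====

-- ---- character-level facts (valid for every Char; the ports only case-change ASCII letters) ----
theorem pvToNatOfNat (n : Nat) (h : n < 55296) : (Char.ofNat n).toNat = n := by
  have hv : n.isValidChar := Or.inl h
  rw [Char.ofNat, dif_pos hv, Char.ofNatAux, Char.toNat]
  simp [UInt32.toNat_ofNatLT]
theorem pvCharEqIffToNat (a b : Char) : a = b ↔ a.toNat = b.toNat := by
  constructor
  · intro h; rw [h]
  · intro h
    have := congrArg Char.ofNat h
    rwa [Char.ofNat_toNat, Char.ofNat_toNat] at this
theorem pvIsupper_iff (c : Char) : PySem.Chars.isupper c = true ↔ 65 ≤ c.toNat ∧ c.toNat ≤ 90 := by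
  simp [PySem.Chars.isupper]; rfl
theorem pvIslower_iff (c : Char) : PySem.Chars.islower c = true ↔ 97 ≤ c.toNat ∧ c.toNat ≤ 122 := by
  simp [PySem.Chars.islower]; rfl
theorem pvIsalpha_iff (c : Char) : PySem.Chars.isalpha c = true ↔
    ((65 ≤ c.toNat ∧ c.toNat ≤ 90) ∨ (97 ≤ c.toNat ∧ c.toNat ≤ 122)) := by
  simp [PySem.Chars.isalpha, PySem.Chars.isupper, PySem.Chars.islower]; rfl
theorem pvIsspace_iff (c : Char) : PySem.Chars.isspace c = true ↔
    (c.toNat = 32 ∨ (9 ≤ c.toNat ∧ c.toNat ≤ 13) ∨ (28 ≤ c.toNat ∧ c.toNat ≤ 31) ∨ c.toNat = 133 ∨ c.toNat = 160 ∨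
     c.toNat = 5760 ∨ (8192 ≤ c.toNat ∧ c.toNat ≤ 8202) ∨ c.toNat = 8232 ∨ c.toNat = 8233 ∨ c.toNat = 8239 ∨
     c.toNat = 8287 ∨ c.toNat = 12288) := by
  simp [PySem.Chars.isspace]; tauto
theorem pvToNat_lowerChar (c : Char) :
    (PySem.Chars.lowerChar c).toNat = if 65 ≤ c.toNat ∧ c.toNat ≤ 90 then c.toNat + 32 else c.toNat := by
  simp only [PySem.Chars.lowerChar]
  by_cases h : PySem.Chars.isupper c = true
  · have hb := (pvIsupper_iff c).1 h
    rw [if_pos h, pvToNatOfNat _ (by omega), if_pos hb]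
  · rw [if_neg h, if_neg (by rw [← pvIsupper_iff c]; exact fun hh => h hh)]
theorem pvToNat_upperChar (c : Char) :
    (PySem.Chars.upperChar c).toNat = if 97 ≤ c.toNat ∧ c.toNat ≤ 122 then c.toNat - 32 else c.toNat := by
  simp only [PySem.Chars.upperChar]
  by_cases h : PySem.Chars.islower c = true
  · have hb := (pvIslower_iff c).1 h
    rw [if_pos h, pvToNatOfNat _ (by omega), if_pos hb]
  · rw [if_neg h, if_neg (by rw [← pvIslower_iff c]; exact fun hh => h hh)]
theorem pvBoolExt (a b : Bool) (h : (a = true) ↔ (b = true)) : a = b := by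
  cases a <;> cases b <;> simp_all

-- a character of B's output is a case variant of the original character
def pvVar (a b : Char) : Prop := a = b ∨ a = PySem.Chars.lowerChar b ∨ a = PySem.Chars.upperChar b

theorem pvLowerLower (c : Char) :
    PySem.Chars.lowerChar (PySem.Chars.lowerChar c) = PySem.Chars.lowerChar c := by
  rw [pvCharEqIffToNat, pvToNat_lowerChar (PySem.Chars.lowerChar c), pvToNat_lowerChar c]
  split_ifs <;> omega
theorem pvLowerUpper (c : Char) :
    PySem.Chars.lowerChar (PySem.Chars.upperChar c) = PySem.Chars.lowerChar c := by
  rw [pvCharEqIffToNat, pvToNat_lowerChar (PySem.Chars.upperChar c), pvToNat_upperChar c,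
      pvToNat_lowerChar c]
  split_ifs <;> omega
theorem pvAlphaLower (c : Char) :
    PySem.Chars.isalpha (PySem.Chars.lowerChar c) = PySem.Chars.isalpha c := by
  apply pvBoolExt
  rw [pvIsalpha_iff, pvIsalpha_iff, pvToNat_lowerChar c]
  split_ifs <;> omega
theorem pvAlphaUpper (c : Char) :
    PySem.Chars.isalpha (PySem.Chars.upperChar c) = PySem.Chars.isalpha c := by
  apply pvBoolExt
  rw [pvIsalpha_iff, pvIsalpha_iff, pvToNat_upperChar c]
  split_ifs <;> omega
theorem pvSpaceLower (c : Char) :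
    PySem.Chars.isspace (PySem.Chars.lowerChar c) = PySem.Chars.isspace c := by
  apply pvBoolExt
  rw [pvIsspace_iff, pvIsspace_iff, pvToNat_lowerChar c]
  split_ifs <;> omega
theorem pvSpaceUpper (c : Char) :
    PySem.Chars.isspace (PySem.Chars.upperChar c) = PySem.Chars.isspace c := by
  apply pvBoolExt
  rw [pvIsspace_iff, pvIsspace_iff, pvToNat_upperChar c]
  split_ifs <;> omega
theorem pvPunctLower (c : Char) :
    ((PySem.Chars.lowerChar c = '.' ∨ PySem.Chars.lowerChar c = '!' ∨ PySem.Chars.lowerChar c = '?')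
      ↔ (c = '.' ∨ c = '!' ∨ c = '?')) := by
  have hdot : ('.' : Char).toNat = 46 := rfl
  have hexc : ('!' : Char).toNat = 33 := rfl
  have hq : ('?' : Char).toNat = 63 := rfl
  rw [pvCharEqIffToNat (PySem.Chars.lowerChar c), pvCharEqIffToNat (PySem.Chars.lowerChar c),
      pvCharEqIffToNat (PySem.Chars.lowerChar c), pvCharEqIffToNat c, pvCharEqIffToNat c,
      pvCharEqIffToNat c, pvToNat_lowerChar c, hdot, hexc, hq]
  split_ifs <;> omega
theorem pvPunctUpper (c : Char) :
    ((PySem.Chars.upperChar c = '.' ∨ PySem.Chars.upperChar c = '!' ∨ PySem.Chars.upperChar c = '?')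
      ↔ (c = '.' ∨ c = '!' ∨ c = '?')) := by
  have hdot : ('.' : Char).toNat = 46 := rfl
  have hexc : ('!' : Char).toNat = 33 := rfl
  have hq : ('?' : Char).toNat = 63 := rfl
  rw [pvCharEqIffToNat (PySem.Chars.upperChar c), pvCharEqIffToNat (PySem.Chars.upperChar c),
      pvCharEqIffToNat (PySem.Chars.upperChar c), pvCharEqIffToNat c, pvCharEqIffToNat c,
      pvCharEqIffToNat c, pvToNat_upperChar c, hdot, hexc, hq]
  split_ifs <;> omega
theorem pvVar_lower (a b : Char) (h : pvVar a b) :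
    PySem.Chars.lowerChar a = PySem.Chars.lowerChar b := by
  rcases h with h | h | h <;> rw [h]
  · exact pvLowerLower b
  · exact pvLowerUpper b
theorem pvVar_alpha (a b : Char) (h : pvVar a b) :
    PySem.Chars.isalpha a = PySem.Chars.isalpha b := by
  rcases h with h | h | h <;> rw [h]
  · exact pvAlphaLower b
  · exact pvAlphaUpper b
theorem pvVar_space (a b : Char) (h : pvVar a b) :
    PySem.Chars.isspace a = PySem.Chars.isspace b := by
  rcases h with h | h | h <;> rw [h]
  · exact pvSpaceLower b
  · exact pvSpaceUpper b
theorem pvVar_punct (a b : Char) (h : pvVar a b) :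
    ((a = '.' ∨ a = '!' ∨ a = '?') ↔ (b = '.' ∨ b = '!' ∨ b = '?')) := by
  rcases h with h | h | h <;> rw [h]
  · exact pvPunctLower b
  · exact pvPunctUpper b
-- ---- list plumbing ----
theorem pvGetD_left {α : Type} (out rest : List α) (j : Nat) (d : α) (h : j < out.length) :
    (out ++ rest).getD j d = out.getD j d :=
  List.getD_append out rest d j h

theorem pvGetD_right {α : Type} (out rest : List α) (t : Nat) (d : α) :
    (out ++ rest).getD (out.length + t) d = rest.getD t d := by
  simp [List.getD_eq_getElem?_getD, List.getElem?_append_right (by omega : out.length ≤ out.length + t)]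

theorem pvSetAppend {α : Type} (out : List α) (c : α) (rest : List α) (v : α) :
    (out ++ c :: rest).set out.length v = out ++ v :: rest := by
  induction out with
  | nil => rfl
  | cons x xs ih => simp [ih]

theorem pvSliceMap {α β : Type} (f : α → β) (xs : List α) (a? b? : Option Int) :
    PySem.List.slice (xs.map f) a? b? = (PySem.List.slice xs a? b?).map f := by
  simp only [PySem.List.slice, List.length_map, ← List.map_drop, ← List.map_take]

-- ---- exception indices ----
theorem pvExc (dl : List Int) : recapExceptions dl = altExceptions dl := by
  cases dl with
  | nil => rfl
  | cons d0 rest =>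
    unfold recapExceptions altExceptions
    have h := PySem.List.foldl_pyRange_pyGetD' (d0 :: rest) 0
      (fun (st : List Int × Int) x => (PySem.Set.add st.1 (st.2 + x), st.2 + x))
      (PySem.Set.add ([] : List Int) d0, d0) (a := 1) (by omega)
    simp only [List.length_cons] at h ⊢
    rw [show ((1 : Int).toNat) = 1 from rfl] at h
    simp only [List.drop_succ_cons, List.drop_zero] at h
    rw [h, List.foldl_cons]
    simp

-- ---- lowercased text is preserved along B's output ----
theorem pvLowEq (text out : List Char) (hle : out.length ≤ text.length)
    (hvar : ∀ j, j < out.length → pvVar (out.getD j ' ') (text.getD j ' ')) :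
    PySem.Chars.lower (out ++ text.drop out.length) = PySem.Chars.lower text := by
  have hout : PySem.Chars.lower out = PySem.Chars.lower (text.take out.length) := by
    apply List.ext_getElem
    · simp [PySem.Chars.lower]; omega
    · intro j h1 h2
      simp only [PySem.Chars.lower, List.getElem_map, List.getElem_take]
      simp only [PySem.Chars.lower, List.length_map] at h1
      apply pvVar_lower
      have := hvar j h1
      rwa [List.getD_eq_getElem _ _ h1, List.getD_eq_getElem _ _ (by omega)] at this
  simp only [PySem.Chars.lower] at hout ⊢
  rw [List.map_append, hout, ← List.map_append, List.take_append_drop]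

-- ---- the backward space scan and B's last-non-space array ----
def pvLns (text : List Char) : Nat → Int
  | 0 => if PySem.Chars.isspace (text.getD 0 ' ') = true then -1 else 0
  | j + 1 => if PySem.Chars.isspace (text.getD (j + 1) ' ') = true then pvLns text j else ((j : Int) + 1)

theorem pvLns_le (text : List Char) (j : Nat) : -1 ≤ pvLns text j ∧ pvLns text j ≤ (j : Int) := by
  induction j with
  | zero => simp [pvLns]; split_ifs <;> omega
  | succ j ih => simp only [pvLns]; split_ifs <;> push_cast <;> omega

theorem pvSkip_eq (cs text : List Char) (hlen : cs.length = text.length)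
    (hsp : ∀ k : Nat, k < text.length →
      PySem.Chars.isspace (cs.getD k ' ') = PySem.Chars.isspace (text.getD k ' ')) :
    ∀ (j : Int) (s : Bool), j < (text.length : Int) → capSkipSpaces cs j s = capSkipSpaces text j s := by
  have main : ∀ (N : Nat) (j : Int) (s : Bool), (j + 1).toNat ≤ N → j < (text.length : Int) →
      capSkipSpaces cs j s = capSkipSpaces text j s := by
    intro N
    induction N with
    | zero =>
      intro j s hN hj
      conv_lhs => rw [capSkipSpaces]
      conv_rhs => rw [capSkipSpaces]
      rw [dif_neg (fun h : _ ∧ _ => absurd h.1 (by omega)),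
          dif_neg (fun h : _ ∧ _ => absurd h.1 (by omega))]
    | succ N ih =>
      intro j s hN hj
      by_cases hj0 : 0 ≤ j
      · have hcast : j = ((j.toNat : Nat) : Int) := by omega
        have hlt : j.toNat < text.length := by omega
        have hsame : PySem.Chars.isspace (PySem.List.pyGetD cs j ' ')
            = PySem.Chars.isspace (PySem.List.pyGetD text j ' ') := by
          rw [hcast, PySem.List.pyGetD_natCast, PySem.List.pyGetD_natCast]
          exact hsp j.toNat hlt
        conv_lhs => rw [capSkipSpaces]
        conv_rhs => rw [capSkipSpaces]
        by_cases hs : PySem.Chars.isspace (PySem.List.pyGetD text j ' ') = true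
        · rw [dif_pos ⟨hj0, by rw [hsame]; exact hs⟩, dif_pos ⟨hj0, hs⟩]
          exact ih (j - 1) true (by omega) (by omega)
        · rw [dif_neg (fun h => hs (by rw [← hsame]; exact h.2)), dif_neg (fun h => hs h.2)]
      · conv_lhs => rw [capSkipSpaces]
        conv_rhs => rw [capSkipSpaces]
        rw [dif_neg (fun h : _ ∧ _ => absurd h.1 hj0), dif_neg (fun h : _ ∧ _ => absurd h.1 hj0)]
  intro j s hj
  exact main (j + 1).toNat j s le_rfl hj

theorem pvSkip_val (text : List Char) :
    ∀ (j : Nat), j < text.length → ∀ s : Bool,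
      capSkipSpaces text (j : Int) s = (s || PySem.Chars.isspace (text.getD j ' '), pvLns text j) := by
  intro j
  induction j with
  | zero =>
    intro _ s
    rw [capSkipSpaces]
    by_cases hs : PySem.Chars.isspace (text.getD 0 ' ') = true
    · rw [dif_pos ⟨le_rfl, by rw [PySem.List.pyGetD_natCast]; exact hs⟩]
      rw [show ((0 : Nat) : Int) - 1 = (-1 : Int) from rfl]
      rw [capSkipSpaces, dif_neg (fun h : _ ∧ _ => absurd h.1 (by omega))]
      rw [List.getD_eq_getElem?_getD] at hs
      simp [pvLns, List.getD_eq_getElem?_getD, hs]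
    · rw [dif_neg (by rw [PySem.List.pyGetD_natCast]; exact fun h => hs h.2)]
      rw [List.getD_eq_getElem?_getD] at hs
      simp only [Bool.not_eq_true] at hs
      simp [pvLns, List.getD_eq_getElem?_getD, hs]
  | succ j ih =>
    intro hj s
    rw [capSkipSpaces]
    by_cases hs : PySem.Chars.isspace (text.getD (j + 1) ' ') = true
    · rw [dif_pos ⟨by positivity, by rw [PySem.List.pyGetD_natCast]; exact hs⟩]
      rw [show ((j + 1 : Nat) : Int) - 1 = ((j : Nat) : Int) by push_cast; ring]
      rw [ih (by omega) true]
      rw [List.getD_eq_getElem?_getD] at hs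
      simp [pvLns, List.getD_eq_getElem?_getD, hs]
    · rw [dif_neg (by rw [PySem.List.pyGetD_natCast]; exact fun h => hs h.2)]
      rw [List.getD_eq_getElem?_getD] at hs
      simp only [Bool.not_eq_true] at hs
      simp [pvLns, List.getD_eq_getElem?_getD, hs]

theorem pvPnsAux (text : List Char) : ∀ (tail : List Char) (m : Nat) (acc : List Int) (last : Int),
    m ≤ text.length → text.drop m = tail → acc = (List.range m).map (pvLns text) →
    last = (if m = 0 then -1 else pvLns text (m - 1)) →
    ((PySem.List.enumerate tail (m : Int)).foldl
        (fun (st : List Int × Int) jc =>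
          let last := if PySem.Chars.isspace jc.2 = false then jc.1 else st.2
          (st.1 ++ [last], last)) (acc, last)).1
      = (List.range text.length).map (pvLns text) := by
  intro tail
  induction tail with
  | nil =>
    intro m acc last hm hdrop hacc hlast
    have : m = text.length := by
      have := congrArg List.length hdrop
      simp at this; omega
    subst this
    simp [PySem.List.enumerate_nil, hacc]
  | cons c tail ih =>
    intro m acc last hm hdrop hacc hlast
    have hmlt : m < text.length := by
      have := congrArg List.length hdrop
      simp at this; omega
    have hc : text.getD m ' ' = c := by
      have := congrArg (fun l => l.getD 0 ' ') hdrop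
      simpa [List.getD_eq_getElem?_getD, List.getElem?_drop] using this
    have hdrop' : text.drop (m + 1) = tail := by
      have := congrArg List.tail hdrop
      simpa [List.tail_drop] using this
    rw [PySem.List.enumerate_cons, List.foldl_cons]
    have hlast' : (if PySem.Chars.isspace c = false then (m : Int) else last)
        = (if m + 1 = 0 then -1 else pvLns text (m + 1 - 1)) := by
      rw [if_neg (Nat.succ_ne_zero m), Nat.add_sub_cancel]
      cases m with
      | zero =>
        simp only [pvLns, hc]
        by_cases hs : PySem.Chars.isspace c = true
        · simp [hs, hlast]
        · simp [Bool.eq_false_iff.mpr hs]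
      | succ j =>
        simp only [pvLns, hc]
        by_cases hs : PySem.Chars.isspace c = true
        · simp [hs, hlast]
        · simp [Bool.eq_false_iff.mpr hs]
    have := ih (m + 1) (acc ++ [if PySem.Chars.isspace c = false then (m : Int) else last])
      (if PySem.Chars.isspace c = false then (m : Int) else last) (by omega) hdrop'
      (by rw [hacc, List.range_succ, List.map_append, List.map_singleton, hlast',
              if_neg (by omega : ¬ (m + 1 = 0)), Nat.add_sub_cancel]) hlast'
    rw [show ((m : Int) + 1) = ((m + 1 : Nat) : Int) by push_cast; ring]
    exact this

theorem pvPns (text : List Char) : altPns text = (List.range text.length).map (pvLns text) := by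
  unfold altPns
  exact pvPnsAux text text 0 [] (-1) (by omega) rfl rfl rfl

theorem pvPns_getD (text : List Char) (j : Nat) (h : j < text.length) :
    (altPns text).getD j (-1) = pvLns text j := by
  rw [pvPns]
  rw [List.getD_eq_getElem?_getD]
  simp [h]

-- ---- the phrase loops ----
theorem pvInner_eq (cs text : List Char) (hlen : cs.length = text.length)
    (hlow : PySem.Chars.lower cs = PySem.Chars.lower text) (i : Nat) (pc : List Char) :
    ∀ ks : List Nat,
      capPhraseInner cs (i : Int) pc ks
        = altPhraseScan i pc
            ((PySem.List.pyRange 0 ((text.length : Int) - (pc.length : Int) + 1) 1).filter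
              (fun s => PySem.List.slice (PySem.Chars.lower text) (some s) (some (s + (pc.length : Int))) = PySem.Chars.lower pc)) ks := by
  have hsl : ∀ s : Int, PySem.Chars.lower (PySem.List.slice cs (some s) (some (s + (pc.length : Int))))
      = PySem.List.slice (PySem.Chars.lower text) (some s) (some (s + (pc.length : Int))) := by
    intro s
    rw [← hlow]
    simp only [PySem.Chars.lower]
    rw [pvSliceMap]
  intro ks
  induction ks with
  | nil => rfl
  | cons k ks ih =>
    simp only [capPhraseInner, altPhraseScan]
    have hmem : (((i : Int) - (k : Int)) ∈
        (PySem.List.pyRange 0 ((text.length : Int) - (pc.length : Int) + 1) 1).filter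
          (fun s => PySem.List.slice (PySem.Chars.lower text) (some s) (some (s + (pc.length : Int))) = PySem.Chars.lower pc))
        ↔ ((0 ≤ (i : Int) - (k : Int) ∧ (i : Int) - (k : Int) + (pc.length : Int) ≤ (cs.length : Int)) ∧
            PySem.List.slice (PySem.Chars.lower text) (some ((i : Int) - (k : Int)))
              (some ((i : Int) - (k : Int) + (pc.length : Int))) = PySem.Chars.lower pc) := by
      rw [List.mem_filter]
      simp only [PySem.List.mem_pyRange_one, decide_eq_true_eq, hlen]
      constructor
      · rintro ⟨⟨h1, h2⟩, h3⟩; exact ⟨⟨h1, by omega⟩, h3⟩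
      · rintro ⟨⟨h1, h2⟩, h3⟩; exact ⟨⟨h1, by omega⟩, h3⟩
    by_cases h1 : 0 ≤ (i : Int) - (k : Int) ∧ (i : Int) - (k : Int) + (pc.length : Int) ≤ (cs.length : Int)
    · rw [if_pos h1]
      by_cases h2 : PySem.Chars.lower (PySem.List.slice cs (some ((i : Int) - (k : Int)))
          (some ((i : Int) - (k : Int) + (pc.length : Int)))) = PySem.Chars.lower pc
      · rw [if_pos h2, if_pos (hmem.mpr ⟨h1, by rw [← hsl]; exact h2⟩)]
      · rw [if_neg h2, if_neg (fun hm => h2 (by rw [hsl]; exact (hmem.mp hm).2)), ih]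
    · rw [if_neg h1, if_neg (fun hm => h1 (hmem.mp hm).1), ih]

theorem pvOuter_eq (cs text : List Char) (hlen : cs.length = text.length)
    (hlow : PySem.Chars.lower cs = PySem.Chars.lower text) (i : Nat) (sc : List String) :
    capPhraseOuter cs (i : Int) sc
      = altPhraseLoop i (altPhraseInfo (PySem.Chars.lower text) text.length sc) := by
  induction sc with
  | nil => rfl
  | cons p ps ih =>
    simp only [capPhraseOuter, altPhraseInfo, List.map_cons, altPhraseLoop]
    by_cases hg : ((p.toList.length : Int) > (i : Int) + 1)
    · rw [if_pos hg, if_pos hg]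
      exact ih
    · rw [if_neg hg, if_neg hg]
      rw [pvInner_eq cs text hlen hlow i p.toList (List.range p.toList.length)]
      rcases hscan : altPhraseScan i p.toList
          ((PySem.List.pyRange 0 ((text.length : Int) - (p.toList.length : Int) + 1) 1).filter
            (fun s => PySem.List.slice (PySem.Chars.lower text) (some s) (some (s + (p.toList.length : Int))) = PySem.Chars.lower p.toList))
          (List.range p.toList.length) with _ | b
      · rw [ih]
        rfl
      · rfl

-- ---- the per-index capitalization rule ----
theorem pvCsGetD (text out : List Char) (hle : out.length ≤ text.length) (k : Nat) :
    (out ++ text.drop out.length).getD k ' ' = if k < out.length then out.getD k ' ' else text.getD k ' ' := by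
  by_cases hk : k < out.length
  · rw [pvGetD_left _ _ _ _ hk, if_pos hk]
  · rw [if_neg hk]
    have hsplit : k = out.length + (k - out.length) := by omega
    rw [hsplit, pvGetD_right]
    simp [List.getD_eq_getElem?_getD, List.getElem?_drop]

theorem pvRule_eq (text : List Char) (sc : List String) (out : List Char)
    (hlt : out.length < text.length)
    (hvar : ∀ j, j < out.length → pvVar (out.getD j ' ') (text.getD j ' '))
    (halpha : PySem.Chars.isalpha (text.getD out.length ' ') = true) :
    capitalization (out.length : Int) (out ++ text.drop out.length) sc
      = altRule text (PySem.Chars.lower text) text.length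
          (altPhraseInfo (PySem.Chars.lower text) text.length sc) (altPns text) out.length out := by
  have hle : out.length ≤ text.length := le_of_lt hlt
  have hn : (out ++ text.drop out.length).length = text.length := by simp; omega
  have hvar' : ∀ j, j < text.length →
      pvVar ((out ++ text.drop out.length).getD j ' ') (text.getD j ' ') := by
    intro j hj
    rw [pvCsGetD text out hle j]
    by_cases hjm : j < out.length
    · rw [if_pos hjm]; exact hvar j hjm
    · rw [if_neg hjm]; exact Or.inl rfl
  have hlow : PySem.Chars.lower (out ++ text.drop out.length) = PySem.Chars.lower text :=
    pvLowEq text out hle hvar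
  have hgd : ∀ k : Nat, k < text.length →
      PySem.List.pyGetD (out ++ text.drop out.length) ((k : Nat) : Int) ' '
        = (if k < out.length then out.getD k ' ' else text.getD k ' ') := by
    intro k hk
    rw [PySem.List.pyGetD_natCast, pvCsGetD text out hle k]
  have hch : PySem.List.pyGetD (out ++ text.drop out.length) ((out.length : Nat) : Int) ' '
      = text.getD out.length ' ' := by
    rw [hgd out.length hlt, if_neg (show ¬ (out.length < out.length) by omega)]
  unfold capitalization altRule
  rw [if_neg (show ¬ ((out.length : Int) < 0 ∨ ((out ++ text.drop out.length).length : Int) ≤ (out.length : Int)) by rw [hn]; omega)]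
  simp only [hch]
  rw [if_neg (by rw [halpha]; simp)]
  by_cases hm0 : out.length = 0
  · rw [if_pos (by exact_mod_cast hm0), if_pos hm0]
  · rw [if_neg (by exact_mod_cast hm0), if_neg hm0]
    have hc1 : (out.length : Int) - 1 = ((out.length - 1 : Nat) : Int) := by omega
    -- the two-previous-uppercase guard
    have hgd2 : (2 ≤ (out.length : Int)
          ∧ PySem.Chars.isupper (PySem.List.pyGetD (out ++ text.drop out.length) ((out.length : Int) - 1) ' ') = true
          ∧ PySem.Chars.isupper (PySem.List.pyGetD (out ++ text.drop out.length) ((out.length : Int) - 2) ' ') = true)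
        ↔ (2 ≤ out.length
          ∧ PySem.Chars.isupper (out.getD (out.length - 1) ' ') = true
          ∧ PySem.Chars.isupper (out.getD (out.length - 2) ' ') = true) := by
      by_cases h2 : 2 ≤ out.length
      · have hc2 : (out.length : Int) - 2 = ((out.length - 2 : Nat) : Int) := by omega
        rw [hc1, hc2,
            hgd (out.length - 1) (by omega), hgd (out.length - 2) (by omega),
            if_pos (show out.length - 1 < out.length by omega), if_pos (show out.length - 2 < out.length by omega)]
        constructor
        · rintro ⟨_, hb, hc⟩; exact ⟨h2, hb, hc⟩
        · rintro ⟨_, hb, hc⟩; exact ⟨by omega, hb, hc⟩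
      · constructor
        · rintro ⟨ha, _, _⟩; omega
        · rintro ⟨ha, _, _⟩; omega
    by_cases hup : 2 ≤ out.length
        ∧ PySem.Chars.isupper (out.getD (out.length - 1) ' ') = true
        ∧ PySem.Chars.isupper (out.getD (out.length - 2) ' ') = true
    · rw [if_pos (hgd2.mpr hup), if_pos hup]
    · rw [if_neg (fun h => hup (hgd2.mp h)), if_neg hup]
      rw [pvOuter_eq (out ++ text.drop out.length) text hn hlow out.length sc]
      rcases hout : altPhraseLoop out.length (altPhraseInfo (PySem.Chars.lower text) text.length sc) with _ | b
      · -- П2 then П4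
        dsimp only
        simp only [hn]
        have hm1 : out.length - 1 < text.length := by omega
        have hsj : capSkipSpaces (out ++ text.drop out.length) ((out.length : Int) - 1) false
            = (PySem.Chars.isspace (text.getD (out.length - 1) ' '), pvLns text (out.length - 1)) := by
          rw [hc1]
          rw [pvSkip_eq (out ++ text.drop out.length) text hn
                (fun k hk => by
                  rw [pvCsGetD text out hle k]
                  by_cases hkm : k < out.length
                  · rw [if_pos hkm]; exact pvVar_space _ _ (hvar k hkm)
                  · rw [if_neg hkm])
                _ _ (by omega)]
          rw [pvSkip_val text (out.length - 1) hm1 false]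
          simp
        have hlnsB := pvLns_le text (out.length - 1)
        have hpns : (altPns text).getD (out.length - 1) (-1) = pvLns text (out.length - 1) :=
          pvPns_getD text (out.length - 1) hm1
        -- the П2 conditions agree
        have hp2 : (0 < (out.length : Int)
              ∧ ((capSkipSpaces (out ++ text.drop out.length) ((out.length : Int) - 1) false).1 = true
                ∧ 0 ≤ (capSkipSpaces (out ++ text.drop out.length) ((out.length : Int) - 1) false).2
                ∧ (PySem.List.pyGetD (out ++ text.drop out.length) (capSkipSpaces (out ++ text.drop out.length) ((out.length : Int) - 1) false).2 ' ' = '.'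
                  ∨ PySem.List.pyGetD (out ++ text.drop out.length) (capSkipSpaces (out ++ text.drop out.length) ((out.length : Int) - 1) false).2 ' ' = '!'
                  ∨ PySem.List.pyGetD (out ++ text.drop out.length) (capSkipSpaces (out ++ text.drop out.length) ((out.length : Int) - 1) false).2 ' ' = '?')))
            ↔ (PySem.Chars.isspace (text.getD (out.length - 1) ' ') = true
              ∧ (0 ≤ (altPns text).getD (out.length - 1) (-1)
                ∧ (PySem.List.pyGetD text ((altPns text).getD (out.length - 1) (-1)) ' ' = '.'
                  ∨ PySem.List.pyGetD text ((altPns text).getD (out.length - 1) (-1)) ' ' = '!'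
                  ∨ PySem.List.pyGetD text ((altPns text).getD (out.length - 1) (-1)) ' ' = '?'))) := by
          rw [hsj, hpns]
          constructor
          · rintro ⟨-, hsaw, hj0, hpunct⟩
            refine ⟨hsaw, hj0, ?_⟩
            have hJcast : pvLns text (out.length - 1) = (((pvLns text (out.length - 1)).toNat : Nat) : Int) := by omega
            have hJlt : (pvLns text (out.length - 1)).toNat < out.length := by omega
            rw [hJcast, hgd _ (by omega), if_pos hJlt] at hpunct
            rw [hJcast, PySem.List.pyGetD_natCast]
            exact (pvVar_punct _ _ (hvar _ hJlt)).1 hpunct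
          · rintro ⟨hsaw, hj0, hpunct⟩
            refine ⟨by omega, hsaw, hj0, ?_⟩
            have hJcast : pvLns text (out.length - 1) = (((pvLns text (out.length - 1)).toNat : Nat) : Int) := by omega
            have hJlt : (pvLns text (out.length - 1)).toNat < out.length := by omega
            rw [hJcast, PySem.List.pyGetD_natCast] at hpunct
            rw [hJcast, hgd _ (by omega), if_pos hJlt]
            exact (pvVar_punct _ _ (hvar _ hJlt)).2 hpunct
        by_cases hp2r : PySem.Chars.isspace (text.getD (out.length - 1) ' ') = true
            ∧ (0 ≤ (altPns text).getD (out.length - 1) (-1)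
              ∧ (PySem.List.pyGetD text ((altPns text).getD (out.length - 1) (-1)) ' ' = '.'
                ∨ PySem.List.pyGetD text ((altPns text).getD (out.length - 1) (-1)) ' ' = '!'
                ∨ PySem.List.pyGetD text ((altPns text).getD (out.length - 1) (-1)) ' ' = '?'))
        · rw [if_pos (hp2.mpr hp2r), if_pos hp2r]
        · rw [if_neg (fun h => hp2r (hp2.mp h)), if_neg hp2r]
          -- П4
          have hlowm : (PySem.Chars.lower text).getD out.length ' '
              = PySem.Chars.lowerChar (text.getD out.length ' ') := by
            simp [PySem.Chars.lower, List.getD_eq_getElem?_getD, hlt]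
          rw [hlowm]
          by_cases hi : PySem.Chars.lowerChar (text.getD out.length ' ') = 'i'
          · rw [if_pos hi, if_pos hi]
            rw [if_pos (show 0 < (out.length : Int) by omega)]
            rw [hc1, hgd (out.length - 1) (by omega), if_pos (show out.length - 1 < out.length by omega)]
            have hprev : PySem.Chars.isalpha (out.getD (out.length - 1) ' ')
                = PySem.Chars.isalpha (text.getD (out.length - 1) ' ') :=
              pvVar_alpha _ _ (hvar _ (by omega))
            have hpb : (decide (0 < out.length) && PySem.Chars.isalpha (text.getD (out.length - 1) ' '))
                = PySem.Chars.isalpha (out.getD (out.length - 1) ' ') := by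
              rw [hprev, decide_eq_true (by omega : 0 < out.length), Bool.true_and]
            rw [hpb]
            by_cases h1n : out.length + 1 < text.length
            · rw [if_pos (show (out.length : Int) + 1 < (text.length : Int) by omega)]
              rw [show ((out.length : Int) + 1) = (((out.length + 1 : Nat)) : Int) by omega]
              rw [hgd (out.length + 1) h1n, if_neg (show ¬ (out.length + 1 < out.length) by omega)]
              have hnb : (decide (out.length + 1 < text.length) && PySem.Chars.isalpha (text.getD (out.length + 1) ' '))
                  = PySem.Chars.isalpha (text.getD (out.length + 1) ' ') := by
                rw [decide_eq_true h1n, Bool.true_and]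
              rw [hnb]
              by_cases hpa : PySem.Chars.isalpha (out.getD (out.length - 1) ' ') = false
                  ∧ PySem.Chars.isalpha (text.getD (out.length + 1) ' ') = false
              · rw [if_pos hpa, if_pos hpa]
                by_cases hdot : text.getD (out.length + 1) ' ' = '.'
                · rw [if_pos hdot]
                  by_cases h2n : out.length + 2 < text.length
                  · rw [if_pos (show (out.length : Int) + 2 < (text.length : Int) by omega)]
                    rw [show ((out.length : Int) + 2) = (((out.length + 2 : Nat)) : Int) by omega]
                    rw [hgd (out.length + 2) h2n, if_neg (show ¬ (out.length + 2 < out.length) by omega)]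
                    by_cases hna : PySem.Chars.isalpha (text.getD (out.length + 2) ' ') = true
                    · rw [if_pos hna, if_pos ⟨⟨h1n, hdot⟩, h2n, hna⟩]
                    · rw [if_neg hna, if_neg (fun h => hna h.2.2)]
                  · rw [if_neg (show ¬ ((out.length : Int) + 2 < (text.length : Int)) by omega)]
                    rw [if_neg (show ¬ (PySem.Chars.isalpha ' ' = true) by decide),
                        if_neg (fun h => h2n h.2.1)]
                · rw [if_neg hdot, if_neg (fun h => hdot h.1.2)]
              · rw [if_neg hpa, if_neg hpa]
            · rw [if_neg (show ¬ ((out.length : Int) + 1 < (text.length : Int)) by omega)]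
              have hnb : (decide (out.length + 1 < text.length) && PySem.Chars.isalpha (text.getD (out.length + 1) ' '))
                  = false := by
                rw [decide_eq_false h1n, Bool.false_and]
              rw [hnb]
              by_cases hpa1 : PySem.Chars.isalpha (out.getD (out.length - 1) ' ') = false
              · have hA : PySem.Chars.isalpha (out.getD (out.length - 1) ' ') = false
                    ∧ PySem.Chars.isalpha ' ' = false := ⟨hpa1, by decide⟩
                have hB : PySem.Chars.isalpha (out.getD (out.length - 1) ' ') = false
                    ∧ (false : Bool) = false := ⟨hpa1, rfl⟩
                rw [if_pos hA, if_pos hB,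
                    if_neg (show ¬ ((' ' : Char) = '.') by decide), if_neg (fun h => h1n h.1.1)]
              · have hA : ¬ (PySem.Chars.isalpha (out.getD (out.length - 1) ' ') = false
                    ∧ PySem.Chars.isalpha ' ' = false) := fun h => hpa1 h.1
                have hB : ¬ (PySem.Chars.isalpha (out.getD (out.length - 1) ' ') = false
                    ∧ (false : Bool) = false) := fun h => hpa1 h.1
                rw [if_neg hA, if_neg hB]
          · rw [if_neg hi, if_neg hi]
      · rfl

-- ---- the two main loops compute the same list ----
theorem pvLoop (text : List Char) (sc : List String) (exc : List Int) :
    ∀ (k m : Nat) (out : List Char), m + k = text.length → out.length = m →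
    (∀ j, j < m → pvVar (out.getD j ' ') (text.getD j ' ')) →
    (List.range' m k).foldl (recapStepA sc exc) (out ++ text.drop m)
      = (PySem.List.enumerate (text.drop m) (m : Int)).foldl
          (altStep text (PySem.Chars.lower text) text.length
            (altPhraseInfo (PySem.Chars.lower text) text.length sc) (altPns text) exc) out := by
  intro k
  induction k with
  | zero =>
    intro m out hmk hlen hvar
    rw [List.drop_eq_nil_of_le (by omega)]
    simp [PySem.List.enumerate_nil]
  | succ k ih =>
    intro m out hmk hlen hvar
    subst hlen
    have hmlt : out.length < text.length := by omega
    have hdropc : text.drop out.length = text.getD out.length ' ' :: text.drop (out.length + 1) := by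
      rw [List.drop_eq_getElem_cons hmlt, List.getD_eq_getElem _ _ hmlt]
    have hext : ∀ v, pvVar v (text.getD out.length ' ') →
        ∀ j, j < out.length + 1 → pvVar ((out ++ [v]).getD j ' ') (text.getD j ' ') := by
      intro v hv j hj
      by_cases hjo : j < out.length
      · rw [pvGetD_left _ _ _ _ hjo]; exact hvar j hjo
      · have hje : j = out.length := by omega
        subst hje
        have h0 := pvGetD_right out [v] 0 ' '
        rw [Nat.add_zero] at h0
        rw [h0]
        exact hv
    have hgetc : (out ++ text.drop out.length).getD out.length ' ' = text.getD out.length ' ' := by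
      have h0 := pvGetD_right out (text.drop out.length) 0 ' '
      rw [Nat.add_zero] at h0
      rw [h0, hdropc]
      rfl
    rw [List.range'_succ, List.foldl_cons]
    conv_rhs => rw [hdropc, PySem.List.enumerate_cons, List.foldl_cons]
    have hstep : recapStepA sc exc (out ++ text.drop out.length) out.length
        = (altStep text (PySem.Chars.lower text) text.length
            (altPhraseInfo (PySem.Chars.lower text) text.length sc) (altPns text) exc out
            ((out.length : Int), text.getD out.length ' ')) ++ text.drop (out.length + 1) := by
      unfold recapStepA altStep
      dsimp only
      rw [hgetc, Int.toNat_natCast]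
      by_cases ha : PySem.Chars.isalpha (text.getD out.length ' ') = false
      · rw [if_pos ha, if_pos ha, hdropc]
        rw [← List.append_cons]
      · rw [if_neg ha, if_neg ha]
        rw [pvRule_eq text sc out hmlt hvar (by revert ha; cases PySem.Chars.isalpha (text.getD out.length ' ') <;> simp)]
        by_cases hx : (altRule text (PySem.Chars.lower text) text.length
              (altPhraseInfo (PySem.Chars.lower text) text.length sc) (altPns text) out.length out
            ^^ decide ((out.length : Int) ∈ exc)) = true
        · rw [if_pos hx, if_pos hx, hdropc, pvSetAppend, ← List.append_cons]
        · rw [if_neg hx, if_neg hx, hdropc, pvSetAppend, ← List.append_cons]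
    rw [hstep]
    by_cases ha : PySem.Chars.isalpha (text.getD out.length ' ') = false
    · have hstepB : altStep text (PySem.Chars.lower text) text.length
          (altPhraseInfo (PySem.Chars.lower text) text.length sc) (altPns text) exc out
          ((out.length : Int), text.getD out.length ' ') = out ++ [text.getD out.length ' '] := by
        unfold altStep; dsimp only; rw [if_pos ha]
      rw [hstepB]
      rw [show ((out.length : Int) + 1) = (((out.length + 1 : Nat)) : Int) by omega]
      exact ih (out.length + 1) (out ++ [text.getD out.length ' ']) (by omega) (by simp)
        (by simpa using hext _ (Or.inl rfl))
    · have ha' : PySem.Chars.isalpha (text.getD out.length ' ') = true := by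
        revert ha; cases PySem.Chars.isalpha (text.getD out.length ' ') <;> simp
      by_cases hx : (altRule text (PySem.Chars.lower text) text.length
            (altPhraseInfo (PySem.Chars.lower text) text.length sc) (altPns text) out.length out
          ^^ decide ((out.length : Int) ∈ exc)) = true
      · have hstepB : altStep text (PySem.Chars.lower text) text.length
            (altPhraseInfo (PySem.Chars.lower text) text.length sc) (altPns text) exc out
            ((out.length : Int), text.getD out.length ' ')
            = out ++ [PySem.Chars.upperChar (text.getD out.length ' ')] := by
          unfold altStep; dsimp only
          rw [if_neg ha, Int.toNat_natCast, if_pos hx]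
        rw [hstepB]
        rw [show ((out.length : Int) + 1) = (((out.length + 1 : Nat)) : Int) by omega]
        exact ih (out.length + 1) (out ++ [PySem.Chars.upperChar (text.getD out.length ' ')]) (by omega) (by simp)
          (by simpa using hext _ (Or.inr (Or.inr rfl)))
      · have hstepB : altStep text (PySem.Chars.lower text) text.length
            (altPhraseInfo (PySem.Chars.lower text) text.length sc) (altPns text) exc out
            ((out.length : Int), text.getD out.length ' ')
            = out ++ [PySem.Chars.lowerChar (text.getD out.length ' ')] := by
          unfold altStep; dsimp only
          rw [if_neg ha, Int.toNat_natCast, if_neg hx]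
        rw [hstepB]
        rw [show ((out.length : Int) + 1) = (((out.length + 1 : Nat)) : Int) by omega]
        exact ih (out.length + 1) (out ++ [PySem.Chars.lowerChar (text.getD out.length ' ')]) (by omega) (by simp)
          (by simpa using hext _ (Or.inr (Or.inl rfl)))

theorem recap_main (distance_list : List Int) (decapitalized_text : String) (special_cases_list : List String) :
    recapitalize distance_list decapitalized_text special_cases_list
      = recapitalize_alt distance_list decapitalized_text special_cases_list := by
  unfold recapitalize recapitalize_alt
  dsimp only
  rw [pvExc, List.range_eq_range']
  congr 1
  have := pvLoop decapitalized_text.toList special_cases_list (altExceptions distance_list)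
    decapitalized_text.toList.length 0 [] (by omega) rfl (by intro j hj; omega)
  simpa using this

-- ===== VERDICT (by name: the statement is the Claim_ definition above) =====
theorem recapitalize_spec : Claim_equal_recapitalize := by
  intro dl t sc _
  unfold Spec_recapitalize
  exact recap_main dl t sc
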